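-- pv_equiv track=rewrite | github.com/aws-solutions-library-samples/guidance-for-a-multi-tenant-generative-ai-gateway-with-cost-and-usage-tracking-on-aws | lambdas/cost_tracking/utils.py | get_model_pricing
-- ===== SOURCE A (Python) =====
-- def get_model_pricing(model_id, MODEL_PRICES):
--     matched = [v for k, v in MODEL_PRICES.items() if model_id in k]
--     if matched:
--         return matched[0]
--     else:
--         parts = model_id.split('.')
--         for i in range(len(parts), 0, -1):
--             partial_id = '.'.join(parts[-i:])
--             matched = [v for k, v in MODEL_PRICES.items() if partial_id in k]
--             if matched:
--                 return matched[0]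
--
--         return None
-- ===== SOURCE B (Python) =====
-- def get_model_pricing(model_id, MODEL_PRICES):
--     # Single pass over the price table with an arg-min accumulator: each key
--     # gets a rank = index of the first (longest) dotted suffix of model_id it
--     # contains; return the value of the first key achieving the minimal rank.
--     parts = model_id.split('.')
--     suffixes = ['.'.join(parts[i:]) for i in range(len(parts))]
--
--     def rank(key):
--         for r, s in enumerate(suffixes):
--             if s in key:
--                 return r
--         return len(suffixes)
--
--     best_rank, best_val = len(suffixes), None
--     for k, v in MODEL_PRICES.items():
--         r = rank(k)
--         if r < best_rank:
--             best_rank, best_val = r, v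
--     return best_val
-- ===== Notes on version B (the rewrite author's own statement) =====
-- stated objective: alternative
-- what changed: A scans candidate suffixes outermost, filtering the whole dict per candidate and returning the first non-empty match list; B inverts the loop structure into one pass over the dict items, computing each key's best-suffix rank and keeping an arg-min accumulator (minimal rank, first such key's value).
import Mathlib
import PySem

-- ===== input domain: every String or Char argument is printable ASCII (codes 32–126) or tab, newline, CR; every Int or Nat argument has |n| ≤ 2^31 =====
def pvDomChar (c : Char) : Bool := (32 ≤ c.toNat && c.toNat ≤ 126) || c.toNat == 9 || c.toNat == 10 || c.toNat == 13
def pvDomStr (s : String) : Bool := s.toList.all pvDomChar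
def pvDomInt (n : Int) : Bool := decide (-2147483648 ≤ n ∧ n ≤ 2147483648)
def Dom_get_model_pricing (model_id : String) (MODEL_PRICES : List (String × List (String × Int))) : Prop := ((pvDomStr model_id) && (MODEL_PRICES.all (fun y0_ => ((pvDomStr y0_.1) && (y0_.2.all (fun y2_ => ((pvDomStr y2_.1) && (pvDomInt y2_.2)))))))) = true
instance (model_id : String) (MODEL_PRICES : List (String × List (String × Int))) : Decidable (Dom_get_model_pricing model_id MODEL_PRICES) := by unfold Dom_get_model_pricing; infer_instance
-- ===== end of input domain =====

-- B inverts A's loop structure: one pass over the price items keeping an arg-min accumulator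
-- (minimal suffix rank, first such key's value) instead of A's per-candidate dict scans (objective: alternative).

-- ===== PORT A =====
-- MODEL_PRICES arrives as a Python dict: .items() iterates PySem.Dict.ofList MODEL_PRICES.
-- model_id.split('.') = (split? model_id ".").getD [] — the separator "." is nonempty, so split? is always some.
def get_model_pricing (model_id : String) (MODEL_PRICES : List (String × List (String × Int))) : Option (List (String × Int)) :=
  match ((PySem.Dict.ofList MODEL_PRICES).items.filter (fun kv => PySem.Str.isIn model_id kv.1)).map Prod.snd with
  | v :: _ => some v
  | [] =>
    -- for i in range(len(parts), 0, -1): early return = fold that freezes on some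
    (PySem.List.pyRange ((((PySem.Str.split? model_id ".").getD []).length : Int)) 0 (-1)).foldl
      (fun acc i =>
        match acc with
        | some v => some v
        | none =>
          match ((PySem.Dict.ofList MODEL_PRICES).items.filter (fun kv =>
              PySem.Str.isIn (PySem.Str.join "." (PySem.List.slice ((PySem.Str.split? model_id ".").getD []) (some (-i)))) kv.1)).map Prod.snd with
          | v :: _ => some v
          | [] => none)
      none

-- ===== PORT B =====
-- Source B's rank helper: index of the first suffix contained in key, or len(suffixes)
def pvRank : List String → String → Nat
  | [], _ => 0
  | c :: rest, k => if PySem.Str.isIn c k then 0 else pvRank rest k + 1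

def get_model_pricing_alt (model_id : String) (MODEL_PRICES : List (String × List (String × Int))) : Option (List (String × Int)) :=
  let parts := (PySem.Str.split? model_id ".").getD []
  let suffixes := (PySem.List.pyRange 0 ((parts.length : Int))).map
    (fun i => PySem.Str.join "." (PySem.List.slice parts (some i)))
  ((PySem.Dict.ofList MODEL_PRICES).items.foldl
    (fun st kv => let r := pvRank suffixes kv.1; if r < st.1 then (r, some kv.2) else st)
    (suffixes.length, (none : Option (List (String × Int))))).2

-- ===== PRECONDITION & SPEC =====
def Spec_get_model_pricing (model_id : String) (MODEL_PRICES : List (String × List (String × Int))) (out : Option (List (String × Int))) : Prop := out = get_model_pricing_alt model_id MODEL_PRICES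
instance (model_id : String) (MODEL_PRICES : List (String × List (String × Int))) (out : Option (List (String × Int))) : Decidable (Spec_get_model_pricing model_id MODEL_PRICES out) := by unfold Spec_get_model_pricing; infer_instance

-- ===== CLAIM (what is proved, stated in full; the proofs are below) =====
def Claim_equal_get_model_pricing : Prop := ∀ (model_id : String) (MODEL_PRICES : List (String × List (String × Int))), Dom_get_model_pricing model_id MODEL_PRICES → Spec_get_model_pricing model_id MODEL_PRICES (get_model_pricing model_id MODEL_PRICES)

-- ===== LEMMAS AND PROOFS =====

-- proof-level reference semantics: candidate-ordered first-match scan (both ports are reduced to it)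
def pvFindPrice (items : List (String × List (String × Int))) (cand : String) : Option (List (String × Int)) :=
  match items with
  | [] => none
  | (k, v) :: rest => if PySem.Str.isIn cand k then some v else pvFindPrice rest cand

def pvScanCands (items : List (String × List (String × Int))) : List String → Option (List (String × Int))
  | [] => none
  | c :: cs =>
    match pvFindPrice items c with
    | some v => some v
    | none => pvScanCands items cs

-- splitOn.go: the pieces it appends are nonempty and re-join (with sep) to cur.reverse ++ l
theorem pv_go_spec (sep : List Char) (hsep : sep ≠ []) :
    ∀ (fuel : Nat) (l cur : List Char) (acc : List (List Char)), l.length < fuel →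
      ∃ ps, PySem.Chars.splitOn.go sep fuel l cur acc = acc.reverse ++ ps ∧ ps ≠ [] ∧
        PySem.Chars.join sep ps = cur.reverse ++ l := by
  intro fuel
  induction fuel with
  | zero => intro l cur acc h; omega
  | succ f ih =>
    intro l cur acc h
    match l with
    | [] =>
      refine ⟨[cur.reverse], ?_, by simp, ?_⟩
      · simp [PySem.Chars.splitOn.go]
      · simp [PySem.Chars.join_singleton]
    | c :: rest =>
      by_cases hp : sep.isPrefixOf (c :: rest) = true
      · have hlt : (List.drop sep.length (c :: rest)).length < f := by
          have : 1 ≤ sep.length := by cases sep <;> simp_all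
          simp [List.length_drop]; simp at h; omega
        obtain ⟨ps, heq, hne, hjoin⟩ := ih (List.drop sep.length (c :: rest)) [] (cur.reverse :: acc) hlt
        have hpre : sep <+: (c :: rest) := List.isPrefixOf_iff_prefix.mp hp
        obtain ⟨t, ht⟩ := hpre
        have hdrop : List.drop sep.length (c :: rest) = t := by
          rw [← ht, List.drop_left]
        refine ⟨cur.reverse :: ps, ?_, by simp, ?_⟩
        · rw [PySem.Chars.splitOn.go]
          simp [hp, heq]
        · match ps, hne with
          | q :: qs, _ =>
            rw [PySem.Chars.join_cons_cons, hjoin, hdrop]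
            simp [← ht]
      · have hlt : rest.length < f := by simp at h; omega
        obtain ⟨ps, heq, hne, hjoin⟩ := ih rest (c :: cur) acc hlt
        refine ⟨ps, ?_, hne, ?_⟩
        · rw [PySem.Chars.splitOn.go]
          simp [hp, heq]
        · rw [hjoin]; simp

-- round trip: sep.join(s.split(sep)) == s, and the parts list is nonempty
theorem pv_splitOn_spec (s sep : List Char) (hsep : sep ≠ []) :
    PySem.Chars.splitOn s sep ≠ [] ∧ PySem.Chars.join sep (PySem.Chars.splitOn s sep) = s := by
  obtain ⟨ps, heq, hne, hjoin⟩ := pv_go_spec sep hsep (s.length + 1) s [] [] (by omega)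
  rw [PySem.Chars.splitOn, heq]
  simpa using ⟨hne, hjoin⟩

-- String-level round trip for the ports' parts list
theorem pv_parts_spec (model_id : String) :
    (PySem.Str.split? model_id ".").getD [] ≠ [] ∧
    PySem.Str.join "." ((PySem.Str.split? model_id ".").getD []) = model_id := by
  have hsep : (String.toList ".") ≠ [] := by decide
  obtain ⟨hne, hjoin⟩ := pv_splitOn_spec model_id.toList (String.toList ".") hsep
  have h1 : PySem.Str.split? model_id "." =
      some ((PySem.Chars.splitOn model_id.toList (String.toList ".")).map String.ofList) := by
    rw [PySem.Str.split?, PySem.Chars.split?]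
    simp
  rw [h1]
  constructor
  · simpa using hne
  · rw [PySem.Str.join]
    simp only [Option.getD_some, List.map_map]
    have : (List.map (String.toList ∘ String.ofList) (PySem.Chars.splitOn model_id.toList (String.toList "."))) = PySem.Chars.splitOn model_id.toList (String.toList ".") := by
      simp [Function.comp_def]
    rw [this, hjoin, String.ofList_toList]

-- first element of A's filtered match list = the first-match scan of one candidate
theorem pv_head_filter (items : List (String × List (String × Int))) (cand : String) :
    (match (items.filter (fun kv => PySem.Str.isIn cand kv.1)).map Prod.snd with
      | v :: _ => some v
      | [] => none) = pvFindPrice items cand := by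
  induction items with
  | nil => rfl
  | cons kv rest ih =>
    obtain ⟨k, v⟩ := kv
    cases h : PySem.Str.isIn cand k with
    | true =>
      simp only [List.filter_cons, h, if_true, List.map_cons, pvFindPrice]
    | false =>
      simp only [List.filter_cons, h, Bool.false_eq_true, if_false]
      rw [ih]
      rw [show PySem.Str.isIn cand k = PySem.Chars.isIn cand.toList k.toList from rfl] at h
      simp [pvFindPrice, h]

-- a fold that freezes on `some` stays frozen
theorem pv_foldl_frozen {R : Type} (f : Option R → Int → Option R)
    (hf : ∀ v i, f (some v) i = some v) :
    ∀ (l : List Int) (v : R), l.foldl f (some v) = some v := by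
  intro l
  induction l with
  | nil => intro v; rfl
  | cons x xs ih => intro v; rw [List.foldl_cons, hf]; exact ih v

-- A's early-return loop body, folded over any index list, is a scan of the mapped candidates
theorem pv_foldl_scan (items : List (String × List (String × Int))) (candOf : Int → String) :
    ∀ l : List Int,
      l.foldl (fun acc i =>
        match acc with
        | some v => some v
        | none =>
          match (items.filter (fun kv => PySem.Str.isIn (candOf i) kv.1)).map Prod.snd with
          | v :: _ => some v
          | [] => none) none
      = pvScanCands items (l.map candOf) := by
  intro l
  induction l with
  | nil => rfl
  | cons x xs ih =>
    rw [List.foldl_cons, List.map_cons]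
    have hx := pv_head_filter items (candOf x)
    show List.foldl _ (match (items.filter (fun kv => PySem.Str.isIn (candOf x) kv.1)).map Prod.snd with
          | v :: _ => some v
          | [] => none) xs = _
    rw [hx]
    cases hfx : pvFindPrice items (candOf x) with
    | none => rw [show pvScanCands items (candOf x :: xs.map candOf) = pvScanCands items (xs.map candOf) by simp [pvScanCands, hfx]]; exact ih
    | some v =>
      rw [show pvScanCands items (candOf x :: xs.map candOf) = some v by simp [pvScanCands, hfx]]
      exact pv_foldl_frozen _ (fun v i => rfl) xs v

-- A's descending index list, mapped to candidates, equals the ascending suffix list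
theorem pv_map_candidates (parts : List String) :
    ∀ m : Nat, m ≤ parts.length →
      (PySem.List.pyRange (m : Int) 0 (-1)).map
          (fun i => PySem.Str.join "." (PySem.List.slice parts (some (-i))))
      = (List.range m).map (fun j => PySem.Str.join "." (parts.drop (parts.length - m + j))) := by
  intro m
  induction m with
  | zero =>
    intro _
    rw [PySem.List.pyRange_neg_one_eq_nil (by norm_num)]
    simp
  | succ m ih =>
    intro hm
    rw [PySem.List.pyRange_neg_one_cons (by exact_mod_cast Nat.succ_pos m), List.map_cons]
    rw [show ((m + 1 : Nat) : Int) - 1 = (m : Int) by push_cast; ring]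
    rw [ih (by omega), List.range_succ_eq_map, List.map_cons, List.map_map]
    congr 1
    · rw [PySem.List.slice_from_neg_natCast parts (m + 1) (Nat.succ_pos m)]
      simp
    · apply List.map_congr_left
      intro j _
      simp only [Function.comp]
      congr 2
      omega

-- pvRank: bound, non-matching prefix, and matching element at the rank
theorem pv_rank_spec (k : String) : ∀ cs : List String,
    pvRank cs k ≤ cs.length ∧
    (∀ c ∈ cs.take (pvRank cs k), PySem.Str.isIn c k = false) ∧
    (pvRank cs k < cs.length →
      ∃ c cs₂, cs.drop (pvRank cs k) = c :: cs₂ ∧ PySem.Str.isIn c k = true) := by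
  intro cs
  induction cs with
  | nil => exact ⟨by simp [pvRank], by simp, by simp [pvRank]⟩
  | cons c rest ih =>
    obtain ⟨hb, hpre, hmat⟩ := ih
    by_cases h : PySem.Str.isIn c k = true
    · have h' : PySem.Chars.isIn c.toList k.toList = true := h
      have hr : pvRank (c :: rest) k = 0 := by simp [pvRank, h']
      refine ⟨by simp [hr], by simp [hr], ?_⟩
      intro _
      exact ⟨c, rest, by simp [hr], h⟩
    · have h' : PySem.Chars.isIn c.toList k.toList = false := Bool.eq_false_iff.mpr h
      have hr : pvRank (c :: rest) k = pvRank rest k + 1 := by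
        simp [pvRank, h']
      refine ⟨?_, ?_, ?_⟩
      · simp [hr]; omega
      · intro x hx
        rw [hr, List.take_succ_cons] at hx
        rcases List.mem_cons.mp hx with h1 | h1
        · subst h1; exact h'
        · exact hpre x h1
      · intro hlt
        rw [hr, List.drop_succ_cons]
        exact hmat (by simp at hlt; omega)

-- scan of [] items is none
theorem pv_scan_nil : ∀ cs : List String, pvScanCands [] cs = none := by
  intro cs
  induction cs with
  | nil => rfl
  | cons c cs ih => simpa [pvScanCands, pvFindPrice] using ih

-- an item matching no candidate can be dropped from the scan
theorem pv_scan_drop (k : String) (v : List (String × Int)) (rest : List (String × List (String × Int))) :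
    ∀ cs : List String, (∀ c ∈ cs, PySem.Str.isIn c k = false) →
      pvScanCands ((k, v) :: rest) cs = pvScanCands rest cs := by
  intro cs
  induction cs with
  | nil => intro _; rfl
  | cons c cs ih =>
    intro h
    have hc : PySem.Chars.isIn c.toList k.toList = false := h c (by simp)
    have : pvFindPrice ((k, v) :: rest) c = pvFindPrice rest c := by
      simp [pvFindPrice, hc]
    rw [pvScanCands, this, pvScanCands]
    cases pvFindPrice rest c with
    | some w => rfl
    | none => exact ih (fun x hx => h x (by simp [hx]))

-- an item whose first matching candidate is c absorbs the tail of the scan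
theorem pv_scan_hit (k : String) (v : List (String × Int)) (rest : List (String × List (String × Int)))
    (c : String) (hc : PySem.Str.isIn c k = true) :
    ∀ (cs₁ cs₂ : List String), (∀ x ∈ cs₁, PySem.Str.isIn x k = false) →
      pvScanCands ((k, v) :: rest) (cs₁ ++ c :: cs₂) = (pvScanCands rest cs₁).or (some v) := by
  intro cs₁
  induction cs₁ with
  | nil =>
    intro cs₂ _
    have hc' : PySem.Chars.isIn c.toList k.toList = true := hc
    simp [pvScanCands, pvFindPrice, hc']
  | cons c₁ cs₁ ih =>
    intro cs₂ h
    have hc₁ : PySem.Chars.isIn c₁.toList k.toList = false := h c₁ (by simp)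
    have hfp : pvFindPrice ((k, v) :: rest) c₁ = pvFindPrice rest c₁ := by
      simp [pvFindPrice, hc₁]
    rw [List.cons_append, pvScanCands, hfp]
    rw [show pvScanCands rest (c₁ :: cs₁) = (match pvFindPrice rest c₁ with
        | some w => some w | none => pvScanCands rest cs₁) from rfl]
    cases pvFindPrice rest c₁ with
    | some w => rfl
    | none => exact ih cs₂ (fun x hx => h x (by simp [hx]))

-- B's arg-min fold over the items = candidate scan over the first b candidates, defaulting to v
theorem pv_fold_scan (cands : List String) :
    ∀ (items : List (String × List (String × Int))) (b : Nat) (v : Option (List (String × Int))),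
      b ≤ cands.length →
      (items.foldl (fun st kv => let r := pvRank cands kv.1; if r < st.1 then (r, some kv.2) else st)
        (b, v)).2 = (pvScanCands items (cands.take b)).or v := by
  intro items
  induction items with
  | nil =>
    intro b v _
    simp [pv_scan_nil]
  | cons kv rest ih =>
    intro b v hb
    obtain ⟨k, w⟩ := kv
    obtain ⟨hrb, hpre, hmat⟩ := pv_rank_spec k cands
    rw [List.foldl_cons]
    by_cases hr : pvRank cands k < b
    · simp only [if_pos hr]
      rw [ih (pvRank cands k) (some w) (by omega)]
      obtain ⟨c, cs₂, hdrop, hc⟩ := hmat (by omega)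
      have htake : cands.take b = cands.take (pvRank cands k) ++ c :: cs₂.take (b - pvRank cands k - 1) := by
        have h1 : cands.take b = cands.take (pvRank cands k) ++ (cands.drop (pvRank cands k)).take (b - pvRank cands k) := by
          rw [← List.take_add]
          congr 1
          omega
        rw [h1, hdrop]
        rw [show b - pvRank cands k = (b - pvRank cands k - 1) + 1 by omega, List.take_succ_cons,
          show b - pvRank cands k - 1 + 1 - 1 = b - pvRank cands k - 1 by omega]
      rw [htake, pv_scan_hit k w rest c hc _ _ hpre]
      cases pvScanCands rest (cands.take (pvRank cands k)) with
      | some x => rfl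
      | none => rfl
    · simp only [if_neg hr]
      rw [ih b v hb]
      rw [pv_scan_drop k w rest (cands.take b)]
      intro c hcmem
      apply hpre
      have : cands.take b = (cands.take (pvRank cands k)).take b := by
        rw [List.take_take]
        congr 1
        omega
      rw [this] at hcmem
      exact List.mem_of_mem_take hcmem

-- ===== VERDICT (by name: the statement is the Claim_ definition above) =====
theorem get_model_pricing_spec : Claim_equal_get_model_pricing := by
  intro model_id MODEL_PRICES _
  unfold Spec_get_model_pricing
  obtain ⟨hne, hjoin⟩ := pv_parts_spec model_id
  -- the ascending suffix list both ports speak about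
  have hB : get_model_pricing_alt model_id MODEL_PRICES
      = pvScanCands (PySem.Dict.ofList MODEL_PRICES).items
          ((List.range ((PySem.Str.split? model_id ".").getD []).length).map
            (fun j => PySem.Str.join "." (((PySem.Str.split? model_id ".").getD []).drop j))) := by
    unfold get_model_pricing_alt
    have hcands : (PySem.List.pyRange 0 ((((PySem.Str.split? model_id ".").getD []).length : Int))).map
        (fun i => PySem.Str.join "." (PySem.List.slice ((PySem.Str.split? model_id ".").getD []) (some i)))
        = (List.range ((PySem.Str.split? model_id ".").getD []).length).map
            (fun j => PySem.Str.join "." (((PySem.Str.split? model_id ".").getD []).drop j)) := by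
      rw [PySem.List.pyRange_zero_natCast, List.map_map]
      apply List.map_congr_left
      intro j _
      simp only [Function.comp]
      rw [PySem.List.slice_from_natCast]
    simp only [hcands]
    rw [pv_fold_scan _ _ _ _ (by simp)]
    rw [List.take_length]
    cases pvScanCands (PySem.Dict.ofList MODEL_PRICES).items
        ((List.range ((PySem.Str.split? model_id ".").getD []).length).map
          (fun j => PySem.Str.join "." (((PySem.Str.split? model_id ".").getD []).drop j))) with
    | some x => rfl
    | none => rfl
  have hLoop : (PySem.List.pyRange ((((PySem.Str.split? model_id ".").getD []).length : Int)) 0 (-1)).foldl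
      (fun acc i =>
        match acc with
        | some v => some v
        | none =>
          match ((PySem.Dict.ofList MODEL_PRICES).items.filter (fun kv =>
              PySem.Str.isIn (PySem.Str.join "." (PySem.List.slice ((PySem.Str.split? model_id ".").getD []) (some (-i)))) kv.1)).map Prod.snd with
          | v :: _ => some v
          | [] => none) none
      = pvScanCands (PySem.Dict.ofList MODEL_PRICES).items
          ((List.range ((PySem.Str.split? model_id ".").getD []).length).map
            (fun j => PySem.Str.join "." (((PySem.Str.split? model_id ".").getD []).drop j))) := by
    refine (pv_foldl_scan (PySem.Dict.ofList MODEL_PRICES).items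
      (fun i => PySem.Str.join "." (PySem.List.slice ((PySem.Str.split? model_id ".").getD []) (some (-i)))) _).trans ?_
    refine congrArg (pvScanCands (PySem.Dict.ofList MODEL_PRICES).items) ?_
    refine (pv_map_candidates ((PySem.Str.split? model_id ".").getD []) _ le_rfl).trans ?_
    apply List.map_congr_left
    intro j _
    congr 2
    omega
  rw [hB]
  unfold get_model_pricing
  cases hmat : ((PySem.Dict.ofList MODEL_PRICES).items.filter (fun kv => PySem.Str.isIn model_id kv.1)).map Prod.snd with
  | nil => exact hLoop
  | cons v tail =>
    have hfind : pvFindPrice (PySem.Dict.ofList MODEL_PRICES).items model_id = some v := by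
      rw [← pv_head_filter, hmat]
    have hlen : ((PySem.Str.split? model_id ".").getD []).length ≠ 0 := by
      simpa using hne
    obtain ⟨k, hk⟩ := Nat.exists_eq_succ_of_ne_zero hlen
    rw [hk, List.range_succ_eq_map, List.map_cons]
    have h0 : PySem.Str.join "." (((PySem.Str.split? model_id ".").getD []).drop 0) = model_id := by
      simpa using hjoin
    rw [h0]
    show some v = _
    simp [pvScanCands, hfind]
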